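-- pv_equiv track=rewrite | github.com/aChatterjee13/sentinel | sentinel/dashboard/security/rbac.py | _expand_role_permissions
-- ===== SOURCE A (Python) =====
-- def _expand_role_permissions(
--     role_permissions: dict[str, list[str]],
--     role_hierarchy: list[str],
-- ) -> dict[str, frozenset[str]]:
--     """Compute the transitive closure of role → permissions.
--
--     Roles inherit permissions from every role appearing earlier in
--     ``role_hierarchy``. So with the default
--     ``[viewer, operator, admin]`` ordering, ``operator`` gains all
--     viewer perms in addition to its own, and ``admin`` gains
--     everything below it.
--     """
--     expanded: dict[str, set[str]] = {}
--     for role in role_hierarchy: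
--         inherited: set[str] = set()
--         # Pick up everything every role below this one already
--         # accumulated. Walking ``role_hierarchy`` in order means
--         # ``expanded`` already contains the lower roles.
--         for lower in role_hierarchy:
--             if lower == role:
--                 break
--             inherited |= expanded.get(lower, set())
--         inherited |= set(role_permissions.get(role, []))
--         expanded[role] = inherited
--     # Roles that exist in role_permissions but aren't part of the
--     # hierarchy still get their direct perms (no inheritance).
--     for role, perms in role_permissions.items():
--         if role not in expanded:
--             expanded[role] = set(perms)
--     return {role: frozenset(perms) for role, perms in expanded.items()}
-- ===== SOURCE B (Python) =====
-- def _expand_role_permissions(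
--     role_permissions: dict[str, list[str]],
--     role_hierarchy: list[str],
-- ) -> dict[str, frozenset[str]]:
--     """Transitive closure of role -> permissions, single pass with a
--     running union of everything accumulated by the hierarchy prefix."""
--     expanded: dict[str, set[str]] = {}
--     running: set[str] = set()
--     for role in role_hierarchy:
--         if role in expanded:
--             continue
--         expanded[role] = running | set(role_permissions.get(role, []))
--         running |= expanded[role]
--     for role, perms in role_permissions.items():
--         if role not in expanded:
--             expanded[role] = set(perms)
--     return {role: frozenset(perms) for role, perms in expanded.items()}
-- ===== Notes on version B (the rewrite author's own statement) =====
-- stated objective: faster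
-- what changed: Replaces A's inner rescan of all lower hierarchy roles at every step by a single running union of everything the prefix has accumulated (repeated hierarchy entries are skipped, which provably recompute the same value in A), turning the quadratic pass into a linear one.
import Mathlib
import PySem

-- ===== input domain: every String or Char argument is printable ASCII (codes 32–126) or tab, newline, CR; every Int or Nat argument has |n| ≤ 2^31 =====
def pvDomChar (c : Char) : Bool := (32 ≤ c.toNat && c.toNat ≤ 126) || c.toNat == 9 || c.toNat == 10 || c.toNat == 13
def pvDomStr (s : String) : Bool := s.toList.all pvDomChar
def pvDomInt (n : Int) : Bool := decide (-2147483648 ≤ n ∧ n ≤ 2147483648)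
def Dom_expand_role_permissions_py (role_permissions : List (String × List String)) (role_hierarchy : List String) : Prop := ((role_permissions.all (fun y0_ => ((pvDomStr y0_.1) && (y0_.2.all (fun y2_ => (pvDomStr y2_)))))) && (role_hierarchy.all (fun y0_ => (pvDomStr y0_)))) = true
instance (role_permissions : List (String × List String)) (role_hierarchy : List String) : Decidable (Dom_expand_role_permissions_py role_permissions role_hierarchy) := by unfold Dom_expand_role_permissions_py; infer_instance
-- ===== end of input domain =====

-- B replaces A's quadratic rescan of all lower roles by a single running union
-- over the hierarchy prefix (skipping roles already expanded); same return value.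

-- ===== PORT A =====
-- role_permissions.get(role, []) : association list, first match (dict lookup)
def pvGetPerms (rp : List (String × List String)) (k : String) : List String :=
  match rp.find? (fun p => p.1 == k) with
  | some p => p.2
  | none => []

-- inner loop of A: 'for lower in role_hierarchy: if lower == role: break; inherited |= expanded.get(lower, set())'
def pvInherit (exp : PySem.Dict String (List String)) (hier : List String) (role : String) : List String :=
  (hier.takeWhile (fun l => l != role)).foldl
    (fun s l => PySem.Set.union s (exp.getD l [])) []

-- body of A's outer loop over role_hierarchy
def pvStepA (rp : List (String × List String)) (hier : List String)
    (exp : PySem.Dict String (List String)) (role : String) : PySem.Dict String (List String) :=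
  exp.insert role (PySem.Set.union (pvInherit exp hier role) (PySem.Set.ofList (pvGetPerms rp role)))

-- second loop (identical in A and in B): roles only in role_permissions keep their direct perms
def pvAddMissing (rp : List (String × List String)) (exp : PySem.Dict String (List String)) :
    PySem.Dict String (List String) :=
  rp.foldl (fun e p => if e.contains p.1 then e else e.insert p.1 (PySem.Set.ofList p.2)) exp

def expand_role_permissions_py (role_permissions : List (String × List String)) (role_hierarchy : List String) : List (String × List String) :=
  let expanded := role_hierarchy.foldl (pvStepA role_permissions role_hierarchy) PySem.Dict.empty
  -- final '{role: frozenset(perms) …}' is the identity on our set representation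
  (pvAddMissing role_permissions expanded).items

-- ===== PORT B =====
-- body of B's single loop: skip seen roles, otherwise extend the running union
def pvStepB (rp : List (String × List String))
    (st : PySem.Dict String (List String) × List String) (role : String) :
    PySem.Dict String (List String) × List String :=
  if st.1.contains role then st
  else
    let v := PySem.Set.union st.2 (PySem.Set.ofList (pvGetPerms rp role))
    (st.1.insert role v, PySem.Set.union st.2 v)

def expand_role_permissions_py_alt (role_permissions : List (String × List String)) (role_hierarchy : List String) : List (String × List String) :=
  let st := role_hierarchy.foldl (pvStepB role_permissions) (PySem.Dict.empty, [])
  (pvAddMissing role_permissions st.1).items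

-- ===== PRECONDITION & SPEC =====
def Spec_expand_role_permissions_py (role_permissions : List (String × List String)) (role_hierarchy : List String) (out : List (String × List String)) : Prop := out = expand_role_permissions_py_alt role_permissions role_hierarchy
instance (role_permissions : List (String × List String)) (role_hierarchy : List String) (out : List (String × List String)) : Decidable (Spec_expand_role_permissions_py role_permissions role_hierarchy out) := by unfold Spec_expand_role_permissions_py; infer_instance

-- ===== CLAIM (what is proved, stated in full; the proofs are below) =====
def Claim_equal_expand_role_permissions_py : Prop := ∀ (role_permissions : List (String × List String)) (role_hierarchy : List String), Dom_expand_role_permissions_py role_permissions role_hierarchy → Spec_expand_role_permissions_py role_permissions role_hierarchy (expand_role_permissions_py role_permissions role_hierarchy)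

-- ===== LEMMAS AND PROOFS =====

-- takeWhile (≠ r) over p ++ r :: xs stops exactly at r when r is not in p
theorem pv_takeWhile_not_mem (p : List String) (r : String) (xs : List String)
    (h : r ∉ p) : (p ++ r :: xs).takeWhile (fun l => l != r) = p := by
  induction p with
  | nil => simp
  | cons a p ih =>
    have ha : a ≠ r := fun e => h (by simp [e])
    simp only [List.cons_append, List.takeWhile_cons]
    simp [ha, ih (fun hm => h (List.mem_cons_of_mem _ hm))]

-- takeWhile (≠ q) of p ++ xs never reaches xs when q ∈ p
theorem pv_takeWhile_mem (p : List String) (q : String) (xs : List String)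
    (h : q ∈ p) : (p ++ xs).takeWhile (fun l => l != q) = p.takeWhile (fun l => l != q) := by
  induction p with
  | nil => cases h
  | cons a p ih =>
    by_cases ha : a = q
    · simp [ha]
    · have hq : q ∈ p := by cases h with
        | head => exact absurd rfl ha
        | tail _ hm => exact hm
      simp only [List.cons_append, List.takeWhile_cons]
      simp [ha, ih hq]

-- membership in a fold of set unions
theorem pv_mem_foldl_union (g : String → List String) (p : List String) :
    ∀ (init : List String) (x : String),
      x ∈ p.foldl (fun s l => PySem.Set.union s (g l)) init ↔ x ∈ init ∨ ∃ l ∈ p, x ∈ g l := by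
  induction p with
  | nil => intro init x; simp
  | cons a p ih =>
    intro init x
    simp only [List.foldl_cons]
    rw [ih]
    simp only [PySem.Set.mem_union, List.mem_cons]
    constructor
    · rintro (⟨hx | hx⟩ | ⟨l, hl, hx⟩)
      · exact Or.inl hx
      · exact Or.inr ⟨a, Or.inl rfl, hx⟩
      · exact Or.inr ⟨l, Or.inr hl, hx⟩
    · rintro (hx | ⟨l, hl | hl, hx⟩)
      · exact Or.inl (Or.inl hx)
      · exact Or.inl (Or.inr (hl ▸ hx))
      · exact Or.inr ⟨l, hl, hx⟩

-- s ∪ t = s when t ⊆ s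
theorem pv_union_eq_self (s t : List String) (h : ∀ x ∈ t, x ∈ s) :
    PySem.Set.union s t = s := by
  show PySem.Set.update s t = s
  rw [PySem.Set.update_eq_append_filter]
  have hnil : List.filter (fun y => !PySem.Set.contains s y) (PySem.Set.ofList t) = [] := by
    rw [List.filter_eq_nil_iff]
    intro x hx
    have hxs : x ∈ s := h x ((PySem.Set.mem_ofList t x).mp hx)
    simpa using hxs
  rw [hnil, List.append_nil]

-- re-inserting the value a key already has is the identity (unique keys)
theorem pv_insert_getD_self (d : PySem.Dict String (List String)) (k : String)
    (hnd : d.keys.Nodup) (hc : d.contains k = true) :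
    d.insert k (d.getD k []) = d := by
  have hsome : (d.get? k).isSome := by rw [← PySem.Dict.contains_eq_isSome_get?]; exact hc
  obtain ⟨v, hv⟩ := Option.isSome_iff_exists.mp hsome
  have hgd : d.getD k [] = v := PySem.Dict.getD_of_get?_eq_some d [] hv
  apply PySem.Dict.ext
  rw [PySem.Dict.items_insert_of_contains d _ hc]
  calc List.map (fun p => if (p.1 == k) = true then (k, d.getD k []) else p) d.items
      = List.map id d.items := by
        refine List.map_congr_left (fun p hp => ?_)
        by_cases hpk : (p.1 == k) = true
        · have hk : p.1 = k := by simpa using hpk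
          have hsp : d.get? p.1 = some p.2 :=
            PySem.Dict.get?_of_mem_items d (by simpa using hp) hnd
          rw [hk, hv] at hsp
          have hvp : v = p.2 := by injection hsp
          simp only [id, if_pos hpk, hgd]
          exact Prod.ext_iff.mpr ⟨hk.symm, hvp⟩
        · simp [hpk]
    _ = d.items := List.map_id _

-- main invariant: A's outer loop with full rescans = B's loop with the running union
theorem pv_main (rp : List (String × List String)) (hier : List String) :
    ∀ (rest p : List String) (exp : PySem.Dict String (List String)) (run : List String),
      hier = p ++ rest →
      exp.keys = PySem.Set.ofList p →
      run = p.foldl (fun s l => PySem.Set.union s (exp.getD l [])) [] →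
      (∀ q ∈ p, exp.getD q [] =
        PySem.Set.union (pvInherit exp hier q) (PySem.Set.ofList (pvGetPerms rp q))) →
      rest.foldl (pvStepA rp hier) exp = (rest.foldl (pvStepB rp) (exp, run)).1 := by
  intro rest
  induction rest with
  | nil => intro p exp run _ _ _ _; rfl
  | cons r rest ih =>
    intro p exp run hhier hkeys hrun hvals
    have hnd : exp.keys.Nodup := by rw [hkeys]; exact PySem.Set.nodup_ofList _
    simp only [List.foldl_cons]
    by_cases hc : exp.contains r = true
    · -- r already expanded: A recomputes the same value, B skips
      have hrp : r ∈ p := by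
        have := (PySem.Dict.contains_iff_mem_keys (d := exp) (k := r)).mp hc
        rw [hkeys] at this
        exact (PySem.Set.mem_ofList p r).mp this
      have hA : pvStepA rp hier exp r = exp := by
        unfold pvStepA
        rw [← hvals r hrp]
        exact pv_insert_getD_self exp r hnd hc
      have hB : pvStepB rp (exp, run) r = (exp, run) := by
        unfold pvStepB; simp [hc]
      rw [hA, hB]
      refine ih (p ++ [r]) exp run (by rw [hhier]; simp) ?_ ?_ ?_
      · rw [hkeys, PySem.Set.ofList_append_singleton,
          PySem.Set.add_of_mem ((PySem.Set.mem_ofList p r).mpr hrp)]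
      · rw [List.foldl_append, List.foldl_cons, List.foldl_nil, ← hrun]
        refine (pv_union_eq_self _ _ ?_).symm
        intro x hx
        rw [hrun]
        exact (pv_mem_foldl_union _ p [] x).mpr (Or.inr ⟨r, hrp, hx⟩)
      · intro q hq
        have hqp : q ∈ p := by
          rcases List.mem_append.mp hq with h | h
          · exact h
          · rw [List.mem_singleton.mp h]; exact hrp
        exact hvals q hqp
    · -- fresh role: A's rescan of the prefix equals B's running union
      have hcf : exp.contains r = false := by
        cases hcv : exp.contains r with
        | false => rfl
        | true => exact absurd hcv hc
      have hnp : r ∉ p := by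
        intro hm
        have hmk : r ∈ exp.keys := by rw [hkeys]; exact (PySem.Set.mem_ofList p r).mpr hm
        have := (PySem.Dict.contains_iff_mem_keys (d := exp) (k := r)).mpr hmk
        exact hc this
      have hinh : pvInherit exp hier r = run := by
        unfold pvInherit
        rw [hhier, pv_takeWhile_not_mem p r rest hnp, hrun]
      set v := PySem.Set.union run (PySem.Set.ofList (pvGetPerms rp r)) with hv
      have hA : pvStepA rp hier exp r = exp.insert r v := by
        rw [hv]; unfold pvStepA; rw [hinh]
      have hB : pvStepB rp (exp, run) r = (exp.insert r v, PySem.Set.union run v) := by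
        rw [hv]; unfold pvStepB; simp [hcf]
      rw [hA, hB]
      have hgetpres : ∀ l ∈ p, (exp.insert r v).getD l [] = exp.getD l [] := by
        intro l hl
        exact PySem.Dict.getD_insert_of_ne exp v [] (fun e => hnp (e ▸ hl))
      have hfold_pres : ∀ (init : List String),
          p.foldl (fun s l => PySem.Set.union s ((exp.insert r v).getD l [])) init =
          p.foldl (fun s l => PySem.Set.union s (exp.getD l [])) init := by
        intro init
        exact PySem.List.foldl_congr_mem p _ _ init (fun acc x hx => by rw [hgetpres x hx])
      refine ih (p ++ [r]) (exp.insert r v) (PySem.Set.union run v)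
        (by rw [hhier]; simp) ?_ ?_ ?_
      · rw [PySem.Dict.keys_insert_of_not_contains exp v hcf, hkeys,
          PySem.Set.ofList_append_singleton,
          PySem.Set.add_of_not_mem (fun hm => hnp ((PySem.Set.mem_ofList p r).mp hm))]
      · rw [List.foldl_append, List.foldl_cons, List.foldl_nil, hfold_pres, ← hrun,
          PySem.Dict.getD_insert_self]
      · intro q hq
        rcases List.mem_append.mp hq with hqp | hqr
        · -- old role: both the stored value and the rescan are unchanged
          have hqr' : q ≠ r := fun e => hnp (e ▸ hqp)
          rw [PySem.Dict.getD_insert_of_ne exp v [] hqr', hvals q hqp]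
          have htw : (hier.takeWhile (fun l => l != q)) = p.takeWhile (fun l => l != q) := by
            rw [hhier]; exact pv_takeWhile_mem p q (r :: rest) hqp
          unfold pvInherit
          rw [htw]
          congr 1
          refine PySem.List.foldl_congr_mem _ _ _ [] (fun acc x hx => ?_)
          have hxp : x ∈ p := (List.takeWhile_sublist _).subset hx
          rw [hgetpres x hxp]
        · -- the freshly inserted role
          have hq' : q = r := List.mem_singleton.mp hqr
          rw [hq', PySem.Dict.getD_insert_self]
          have hinh' : pvInherit (exp.insert r v) hier r = run := by
            unfold pvInherit
            rw [hhier, pv_takeWhile_not_mem p r rest hnp, hfold_pres, ← hrun]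
          rw [hinh']

-- ===== VERDICT (by name: the statement is the Claim_ definition above) =====
theorem expand_role_permissions_py_spec : Claim_equal_expand_role_permissions_py := by
  unfold Claim_equal_expand_role_permissions_py
  intro rp hier _
  unfold Spec_expand_role_permissions_py expand_role_permissions_py expand_role_permissions_py_alt
  have h := pv_main rp hier hier [] PySem.Dict.empty [] rfl (by rfl) rfl (by intro q hq; cases hq)
  rw [h]
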